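-- pv_equiv track=rewrite | github.com/ishikawa-takumi/english-sing | sing2/app.py | character_initial
-- ===== SOURCE A (Python) =====
-- def character_initial(character_name):
--     """Get one avatar initial from the character name."""
--     cleaned = character_name.strip()
--     if not cleaned:
--         return "?"
--     for token in cleaned.split():
--         if token and token[0].isalnum():
--             return token[0].upper()
--     return cleaned[0].upper()
-- ===== SOURCE B (Python) =====
-- def character_initial(character_name):
--     """Get one avatar initial from the character name."""
--     cleaned = character_name.strip()
--     if not cleaned:
--         return "?"
--     at_boundary = True
--     for ch in cleaned:
--         if at_boundary and ch.isalnum():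
--             return ch.upper()
--         at_boundary = ch.isspace()
--     return cleaned[0].upper()
-- ===== Notes on version B (the rewrite author's own statement) =====
-- stated objective: alternative
-- what changed: Replaces the split-into-tokens loop with a single character scan over the stripped string that tracks a word-boundary flag and returns the first token-initial alphanumeric character.
import Mathlib
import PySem

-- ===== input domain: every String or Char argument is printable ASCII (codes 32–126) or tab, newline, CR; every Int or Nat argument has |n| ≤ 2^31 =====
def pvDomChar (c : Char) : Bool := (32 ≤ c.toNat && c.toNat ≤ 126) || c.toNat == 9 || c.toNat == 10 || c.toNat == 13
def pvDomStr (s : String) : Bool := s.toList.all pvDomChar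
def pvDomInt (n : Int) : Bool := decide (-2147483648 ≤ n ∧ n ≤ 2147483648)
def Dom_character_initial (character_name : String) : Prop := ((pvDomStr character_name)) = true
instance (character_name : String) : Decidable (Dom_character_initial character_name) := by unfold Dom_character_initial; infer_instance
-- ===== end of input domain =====

-- B replaces A's split()-token loop by a single boundary-tracking character scan; objective: alternative (same cost).

-- ===== PORT A =====
-- the 'for token in cleaned.split()' loop with its fallback return
def pvTokLoop : List (List Char) → List Char → String
  | [], cleaned => String.ofList [PySem.Chars.upperChar (cleaned.headD '?')]
  | t :: rest, cleaned =>
    match t with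
    | [] => pvTokLoop rest cleaned
    | c :: _ =>
      if PySem.Chars.isalnum c then String.ofList [PySem.Chars.upperChar c]
      else pvTokLoop rest cleaned

def character_initial (character_name : String) : String :=
  let cleaned := PySem.Chars.strip character_name.toList
  if cleaned.isEmpty then "?"
  else pvTokLoop (PySem.Chars.split₀ cleaned) cleaned

-- ===== PORT B =====
-- single pass: at_boundary flag, return first boundary alnum char
def pvCharScan : List Char → Bool → Option Char
  | [], _ => none
  | c :: rest, atb =>
    if atb && PySem.Chars.isalnum c then some c
    else pvCharScan rest (PySem.Chars.isspace c)

def character_initial_alt (character_name : String) : String :=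
  let cleaned := PySem.Chars.strip character_name.toList
  if cleaned.isEmpty then "?"
  else
    match pvCharScan cleaned true with
    | some c => String.ofList [PySem.Chars.upperChar c]
    | none => String.ofList [PySem.Chars.upperChar (cleaned.headD '?')]

-- ===== PRECONDITION & SPEC =====
def Spec_character_initial (character_name : String) (out : String) : Prop := out = character_initial_alt character_name
instance (character_name : String) (out : String) : Decidable (Spec_character_initial character_name out) := by unfold Spec_character_initial; infer_instance

-- ===== CLAIM (what is proved, stated in full; the proofs are below) =====
def Claim_equal_character_initial : Prop := ∀ (character_name : String), Dom_character_initial character_name → Spec_character_initial character_name (character_initial character_name)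

-- ===== LEMMAS AND PROOFS =====

-- head of the first token whose head is alphanumeric
def pvFirstTok : List (List Char) → Option Char
  | [] => none
  | [] :: rest => pvFirstTok rest
  | (c :: _) :: rest => if PySem.Chars.isalnum c then some c else pvFirstTok rest

theorem pvTokLoop_eq (ts : List (List Char)) (cleaned : List Char) :
    pvTokLoop ts cleaned =
      match pvFirstTok ts with
      | some c => String.ofList [PySem.Chars.upperChar c]
      | none => String.ofList [PySem.Chars.upperChar (cleaned.headD '?')] := by
  induction ts with
  | nil => rfl
  | cons t rest ih =>
    cases t with
    | nil => simpa [pvTokLoop, pvFirstTok] using ih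
    | cons c cs =>
      by_cases h : PySem.Chars.isalnum c = true <;>
        simp [pvTokLoop, pvFirstTok, h, ih]

theorem pvFirstTok_append (xs ys : List (List Char)) :
    pvFirstTok (xs ++ ys) = (pvFirstTok xs).orElse (fun _ => pvFirstTok ys) := by
  induction xs with
  | nil => rfl
  | cons t rest ih =>
    cases t with
    | nil => simpa [pvFirstTok] using ih
    | cons c cs =>
      by_cases h : PySem.Chars.isalnum c = true <;> simp [pvFirstTok, h, ih]

theorem pv_space_not_alnum (c : Char) (h : PySem.Chars.isspace c = true) :
    PySem.Chars.isalnum c = false := by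
  simp only [PySem.Chars.isspace] at h
  simp only [PySem.Chars.isalnum, PySem.Chars.isalpha, PySem.Chars.isdigit,
    PySem.Chars.isupper, PySem.Chars.islower, Char.le_def, UInt32.le_iff_toNat_le,
    Char.toNat] at *
  simp only [Bool.or_eq_true, Bool.and_eq_true, decide_eq_true_eq] at h
  simp only [Bool.or_eq_false_iff, Bool.and_eq_false_iff, decide_eq_false_iff_not, not_le]
  have hlit : ('A'.val.toNat = 65) ∧ 'Z'.val.toNat = 90 ∧ 'a'.val.toNat = 97 ∧
      'z'.val.toNat = 122 ∧ '0'.val.toNat = 48 ∧ '9'.val.toNat = 57 := by decide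
  omega

-- the boundary state B's scan is in after having read the (reversed) partial token cur
def pvAux (cur cs : List Char) : Option Char :=
  match cur.reverse with
  | [] => pvCharScan cs true
  | c :: _ => if PySem.Chars.isalnum c then some c else pvCharScan cs false

theorem pv_go_eq (cs : List Char) : ∀ (cur : List Char) (acc : List (List Char)),
    pvFirstTok (PySem.Chars.split₀.go cs cur acc) =
      (pvFirstTok acc.reverse).orElse (fun _ => pvAux cur cs) := by
  induction cs with
  | nil =>
    intro cur acc
    by_cases hc : cur = []
    · subst hc
      simp [PySem.Chars.split₀.go, pvAux, pvCharScan]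
    · have hrev : cur.reverse ≠ [] := by simpa using hc
      obtain ⟨c, rest, hcr⟩ := List.exists_cons_of_ne_nil hrev
      simp [PySem.Chars.split₀.go, List.isEmpty_iff, hc, pvFirstTok_append, pvAux, hcr]
      by_cases h : PySem.Chars.isalnum c = true <;>
        simp [pvFirstTok, h, pvCharScan]
  | cons c rest ih =>
    intro cur acc
    by_cases hs : PySem.Chars.isspace c = true
    · have hna := pv_space_not_alnum c hs
      by_cases hc : cur = []
      · subst hc
        simp [PySem.Chars.split₀.go, hs, ih, pvAux, pvCharScan, hna]
      · have hrev : cur.reverse ≠ [] := by simpa using hc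
        obtain ⟨d, ds, hcr⟩ := List.exists_cons_of_ne_nil hrev
        simp only [PySem.Chars.split₀.go, hs, if_pos, List.isEmpty_iff, hc, if_neg,
          not_false_iff, ih, List.reverse_cons, pvFirstTok_append, pvAux, hcr]
        by_cases h : PySem.Chars.isalnum d = true <;>
          cases hacc : pvFirstTok acc.reverse <;>
            simp [pvFirstTok, h, pvCharScan, hs, hna, Option.orElse]
    · simp only [PySem.Chars.split₀.go, hs, if_neg, Bool.not_eq_true, ih]
      congr 1
      funext _
      by_cases hc : cur = []
      · subst hc
        simp [pvAux, pvCharScan, hs]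
      · have hrev : cur.reverse ≠ [] := by simpa using hc
        obtain ⟨d, ds, hcr⟩ := List.exists_cons_of_ne_nil hrev
        simp [pvAux, hcr, pvCharScan, hs]

theorem pvFirstTok_split₀ (cs : List Char) :
    pvFirstTok (PySem.Chars.split₀ cs) = pvCharScan cs true := by
  simpa [PySem.Chars.split₀, pvAux, pvFirstTok, Option.orElse] using pv_go_eq cs [] []

-- ===== VERDICT (by name: the statement is the Claim_ definition above) =====
theorem character_initial_spec : Claim_equal_character_initial := by
  intro s _
  unfold Spec_character_initial character_initial character_initial_alt
  by_cases h : (PySem.Chars.strip s.toList).isEmpty = true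
  · simp [h]
  · simp only [h, if_neg, Bool.not_eq_true, pvTokLoop_eq, pvFirstTok_split₀]
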